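-- pv_equiv track=rewrite | github.com/AHatim/gomuku-ai-player | gomuku.py | get_winning_condition
-- ===== SOURCE A (Python) =====
-- def get_winning_condition(board, player):
--     # Check rows
--     for row in board:
--         if ''.join(row).count(player) > 4:
--             return True, player
--     # Check columns
--     for col in range(len(board[0])):
--         column = ''.join(row[col] for row in board)
--         if column.count(player) > 4:
--             return True, player
--     # Check diagonals
--     for i in range(len(board) - 4):
--         for j in range(len(board[0]) - 4):
--             diagonal = ''.join(board[i + k][j + k] for k in range(5))
--             anti_diagonal = ''.join(board[i + k][j + 4 - k] for k in range(5))
--             if diagonal.count(player) > 4 or anti_diagonal.count(player) > 4: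
--                 return True, player
--     return False, None
-- ===== SOURCE B (Python) =====
-- def get_winning_condition(board, player):
--     # Different algorithm: one row-major sweep groups every cell into its column
--     # string (instead of re-scanning the whole board once per column), and the
--     # diagonal phase extracts each full diagonal / anti-diagonal of the w-by-h
--     # rectangle and slides a 5-cell window along it (instead of enumerating
--     # window corners and re-reading the board per corner).
--     h, w = len(board), len(board[0])
--     cols = [[] for _ in range(w)]
--     for row in board:
--         for j, cell in enumerate(row):
--             if j < w:
--                 cols[j].append(cell)
--     if any(s.count(player) > 4
--            for s in [''.join(row) for row in board] + [''.join(c) for c in cols]):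
--         return True, player
--     for d in range(h + w - 1):
--         lo, hi = max(0, d - w + 1), min(h, d + 1)
--         diag = [board[i][i - d + w - 1] for i in range(lo, hi)]
--         anti = [board[i][d - i] for i in range(lo, hi)]
--         if any(''.join(cells[t:t + 5]).count(player) > 4
--                for cells in (diag, anti) for t in range(len(cells) - 4)):
--             return True, player
--     return False, None
-- ===== Notes on version B (the rewrite author's own statement) =====
-- stated objective: faster
-- what changed: B builds all column strings in one row-major sweep that touches each cell once (A re-scans the whole board once per column), and replaces A's diagonal window-corner enumeration by extracting each full diagonal and anti-diagonal of the rectangle once and sliding a 5-cell window along it.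
import Mathlib
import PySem

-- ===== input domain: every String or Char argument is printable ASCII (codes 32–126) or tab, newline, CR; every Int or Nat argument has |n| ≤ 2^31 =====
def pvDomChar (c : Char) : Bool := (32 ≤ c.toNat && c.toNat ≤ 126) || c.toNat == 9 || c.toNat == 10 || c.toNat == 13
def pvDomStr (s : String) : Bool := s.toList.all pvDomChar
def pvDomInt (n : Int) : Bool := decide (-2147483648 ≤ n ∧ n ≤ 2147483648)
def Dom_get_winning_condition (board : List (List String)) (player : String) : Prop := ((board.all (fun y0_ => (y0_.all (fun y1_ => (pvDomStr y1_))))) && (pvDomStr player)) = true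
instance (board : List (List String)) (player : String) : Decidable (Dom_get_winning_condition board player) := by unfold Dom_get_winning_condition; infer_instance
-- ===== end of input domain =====

-- B builds the column strings in one row-major sweep over the cells and replaces
-- A's diagonal window-corner enumeration by extracting each full (anti-)diagonal
-- once and sliding a 5-cell window along it; equal return value on Pre_.

-- board[i][j], indices known in range under Pre_ (getD default never used there)
def pvCell (board : List (List String)) (i j : Int) : String :=
  PySem.List.pyGetD (PySem.List.pyGetD board i []) j ""

-- ===== PORT A =====
def get_winning_condition (board : List (List String)) (player : String) : Bool × Option String :=
  if board.any (fun row => decide (PySem.Str.count (PySem.Str.join "" row) player > 4)) then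
    (true, some player)
  else if (PySem.List.pyRange 0 (((board.headD []).length : Int)) 1).any (fun col =>
      decide (PySem.Str.count (PySem.Str.join ""
        (board.map (fun row => PySem.List.pyGetD row col ""))) player > 4)) then
    (true, some player)
  else if (PySem.List.pyRange 0 ((board.length : Int) - 4) 1).any (fun i =>
      (PySem.List.pyRange 0 (((board.headD []).length : Int) - 4) 1).any (fun j =>
        decide (PySem.Str.count (PySem.Str.join "" ((PySem.List.pyRange 0 5 1).map (fun k =>
          pvCell board (i + k) (j + k)))) player > 4)
        || decide (PySem.Str.count (PySem.Str.join "" ((PySem.List.pyRange 0 5 1).map (fun k =>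
          pvCell board (i + k) (j + 4 - k)))) player > 4))) then
    (true, some player)
  else (false, none)

-- ===== PORT B =====
def get_winning_condition_alt (board : List (List String)) (player : String) : Bool × Option String :=
  let h : Int := (board.length : Int)
  let w : Int := ((board.headD []).length : Int)
  -- one sweep: for row in board: for j, cell in enumerate(row): if j < w: cols[j].append(cell)
  let cols := board.foldl (fun cs row =>
      (PySem.List.enumerate row 0).foldl (fun cs jc =>
        if jc.1 < w then cs.set jc.1.toNat ((cs.getD jc.1.toNat []) ++ [jc.2]) else cs) cs)
    (List.replicate w.toNat ([] : List String))
  if ((board.map (fun row => PySem.Str.join "" row)) ++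
      (cols.map (fun c => PySem.Str.join "" c))).any
      (fun s => decide (PySem.Str.count s player > 4)) then
    (true, some player)
  else if (PySem.List.pyRange 0 (h + w - 1) 1).any (fun d =>
      let lo := max 0 (d - w + 1)
      let hi := min h (d + 1)
      let diag := (PySem.List.pyRange lo hi 1).map (fun i => pvCell board i (i - d + w - 1))
      let anti := (PySem.List.pyRange lo hi 1).map (fun i => pvCell board i (d - i))
      [diag, anti].any (fun cells =>
        (PySem.List.pyRange 0 ((cells.length : Int) - 4) 1).any (fun t =>
          decide (PySem.Str.count (PySem.Str.join ""
            (PySem.List.slice cells (some t) (some (t + 5)))) player > 4)))) then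
    (true, some player)
  else (false, none)

-- ===== PRECONDITION & SPEC =====
-- Pre_ excludes empty boards and ragged boards (a row shorter than row 0) that
-- have no winning row: there A raises IndexError while building a column, except
-- when an early column check still wins first — and there B returns A's exact
-- value anyway (see cites); A's raise set itself has no closed form.
def Pre_get_winning_condition (board : List (List String)) (player : String) : Prop :=
  board ≠ [] ∧ ((∀ row ∈ board, (board.headD []).length ≤ row.length) ∨
    ∃ row ∈ board, PySem.Str.count (PySem.Str.join "" row) player > 4)
instance (board : List (List String)) (player : String) : Decidable (Pre_get_winning_condition board player) := by unfold Pre_get_winning_condition; infer_instance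
def pvWitness_get_winning_condition : List (List String) × String :=
  ([["x", "o"], ["o", "x"]], "x")
def Spec_get_winning_condition (board : List (List String)) (player : String) (out : Bool × Option String) : Prop := out = get_winning_condition_alt board player
instance (board : List (List String)) (player : String) (out : Bool × Option String) : Decidable (Spec_get_winning_condition board player out) := by unfold Spec_get_winning_condition; infer_instance

-- ===== CLAIM (what is proved, stated in full; the proofs are below) =====
def Claim_equal_get_winning_condition : Prop := ∀ (board : List (List String)) (player : String), Dom_get_winning_condition board player → Pre_get_winning_condition board player → Spec_get_winning_condition board player (get_winning_condition board player)

-- ===== LEMMAS AND PROOFS =====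

theorem sweep_row (w : Nat) (row : List String) (s : Nat) (cs : List (List String)) (hcs : cs.length = w) :
  (PySem.List.enumerate row (s:Int)).foldl (fun cs jc => if jc.1 < (w:Int) then cs.set jc.1.toNat ((cs.getD jc.1.toNat []) ++ [jc.2]) else cs) cs
  = cs.mapIdx (fun j x => if s ≤ j ∧ j - s < row.length then x ++ [row.getD (j - s) ""] else x) := by
  induction row generalizing s cs with
  | nil =>
      simp [PySem.List.enumerate_nil]
      apply List.ext_getElem
      · simp
      · intro i h1 h2
        simp [List.getElem_mapIdx]
  | cons c rest ih =>
      rw [PySem.List.enumerate_cons, List.foldl_cons]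
      have hstep : (if ((s:Int)) < (w:Int) then cs.set (s:Int).toNat ((cs.getD (s:Int).toNat []) ++ [c]) else cs)
          = cs.set s ((cs.getD s []) ++ [c]) := by
        by_cases h : (s:Int) < (w:Int)
        · simp [h]
        · rw [if_neg h, List.set_eq_of_length_le (by omega : cs.length ≤ s)]
      have hcast : (s:Int) + 1 = ((s+1 : Nat) : Int) := by push_cast; ring
      rw [hstep, hcast, ih (s+1) _ (by simp [hcs])]
      apply List.ext_getElem
      · simp
      · intro i h1 h2
        simp only [List.length_mapIdx, List.length_set, List.length_cons] at h1 h2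
        simp only [List.getElem_mapIdx, List.length_cons]
        rw [List.getElem_set]
        by_cases hi : s = i
        · subst hi
          rw [if_pos rfl, if_neg (by omega), if_pos (by omega)]
          simp [List.getD, List.getElem?_eq_getElem h1]
        · rw [if_neg hi]
          by_cases h2' : s + 1 ≤ i ∧ i - (s+1) < rest.length
          · rw [if_pos h2', if_pos (by omega)]
            have he : i - s = (i - (s+1)) + 1 := by omega
            rw [he, List.getD_cons_succ]
          · rw [if_neg h2', if_neg (by omega)]

theorem sweep_cols (w : Nat) (rows : List (List String)) (hw : ∀ r ∈ rows, w ≤ r.length) (g : Nat → List String) :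
  rows.foldl (fun cs row =>
      (PySem.List.enumerate row 0).foldl (fun cs jc =>
        if jc.1 < (w:Int) then cs.set jc.1.toNat ((cs.getD jc.1.toNat []) ++ [jc.2]) else cs) cs)
    ((List.range w).map g)
  = (List.range w).map (fun c => g c ++ rows.map (fun r => r.getD c "")) := by
  induction rows generalizing g with
  | nil => simp
  | cons row rest ih =>
      rw [List.foldl_cons]
      have hrow : w ≤ row.length := hw row (by simp)
      have hr := sweep_row w row 0 ((List.range w).map g) (by simp)
      simp only [Nat.cast_zero, Nat.sub_zero, Nat.zero_le, true_and] at hr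
      have hmap : (List.mapIdx (fun j x => if j < row.length then x ++ [row.getD j ""] else x)
          ((List.range w).map g))
          = (List.range w).map (fun c => (fun c => g c ++ [row.getD c ""]) c) := by
        apply List.ext_getElem
        · simp
        · intro i h1 h2
          simp only [List.getElem_mapIdx, List.getElem_map, List.getElem_range]
          have : i < w := by simpa using h2
          rw [if_pos (by omega)]
      rw [hr, hmap, ih (fun r hr => hw r (by simp [hr]))]
      simp [List.append_assoc]

theorem pyRange5 (a : Int) : PySem.List.pyRange a (a+5) 1 = [a, a+1, a+2, a+3, a+4] := by
  rw [PySem.List.pyRange_one_cons (by omega), PySem.List.pyRange_one_cons (by omega),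
      PySem.List.pyRange_one_cons (by omega), PySem.List.pyRange_one_cons (by omega),
      PySem.List.pyRange_one_cons (by omega), PySem.List.pyRange_one_eq_nil (by omega)]
  norm_num
  omega

theorem awindow_eq (g : Int → String) : (PySem.List.pyRange 0 5 1).map g = [g 0, g 1, g 2, g 3, g 4] := by
  have h : PySem.List.pyRange 0 5 1 = [0, 1, 2, 3, 4] := by decide
  rw [h]; rfl

theorem window_eq (f : Int → String) (lo hi t : Int) (ht : 0 ≤ t) (h5 : t + 5 ≤ hi - lo) :
    PySem.List.slice ((PySem.List.pyRange lo hi 1).map f) (some t) (some (t+5))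
      = [f (lo+t), f (lo+t+1), f (lo+t+2), f (lo+t+3), f (lo+t+4)] := by
  rw [PySem.List.slice_toNat _ ht (by omega)]
  have hsplit : PySem.List.pyRange lo hi 1
      = PySem.List.pyRange lo (lo+t) 1 ++ (PySem.List.pyRange (lo+t) (lo+t+5) 1 ++ PySem.List.pyRange (lo+t+5) hi 1) := by
    rw [← PySem.List.pyRange_one_append (lo+t) (lo+t+5) hi (by omega) (by omega),
        ← PySem.List.pyRange_one_append lo (lo+t) hi (by omega) (by omega)]
  rw [hsplit]
  simp only [List.map_append]
  have hl1 : ((PySem.List.pyRange lo (lo+t) 1).map f).length = t.toNat := by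
    simp [PySem.List.length_pyRange_one]; try omega
  rw [← hl1, List.drop_left, hl1]
  have hmid : ((PySem.List.pyRange (lo+t) (lo+t+5) 1).map f) = [f (lo+t), f (lo+t+1), f (lo+t+2), f (lo+t+3), f (lo+t+4)] := by
    have h2 : lo + t + 5 = (lo + t) + 5 := by ring
    rw [h2, pyRange5]; rfl
  have htn : (t+5).toNat - t.toNat = 5 := by omega
  rw [htn, List.take_append_of_le_length (by rw [hmid]; simp), hmid]
  simp

theorem inner_any (p : String → Bool) (f : Int → String) (lo hi : Int) :
    ((PySem.List.pyRange 0 ((((PySem.List.pyRange lo hi 1).map f).length : Int) - 4) 1).any (fun t =>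
       p (PySem.Str.join "" (PySem.List.slice ((PySem.List.pyRange lo hi 1).map f) (some t) (some (t+5))))) = true)
    ↔ ∃ t : Int, 0 ≤ t ∧ t + 5 ≤ hi - lo ∧ p (PySem.Str.join "" [f (lo+t), f (lo+t+1), f (lo+t+2), f (lo+t+3), f (lo+t+4)]) = true := by
  rw [List.any_eq_true]
  constructor
  · rintro ⟨t, ht, hp⟩
    rw [PySem.List.mem_pyRange_one] at ht
    obtain ⟨h0, h1⟩ := ht
    have h5 : t + 5 ≤ hi - lo := by
      simp [PySem.List.length_pyRange_one] at h1; omega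
    exact ⟨t, h0, h5, by rwa [window_eq f lo hi t h0 h5] at hp⟩
  · rintro ⟨t, h0, h5, hp⟩
    refine ⟨t, ?_, by rwa [window_eq f lo hi t h0 h5]⟩
    rw [PySem.List.mem_pyRange_one]
    constructor
    · exact h0
    · simp [PySem.List.length_pyRange_one]; omega

theorem bool_ext {a b : Bool} (h : a = true ↔ b = true) : a = b := by
  cases a <;> cases b <;> simp_all

theorem diag_phase (p : String → Bool) (cell : Int → Int → String) (h w : Int) :
    ((PySem.List.pyRange 0 (h - 4) 1).any (fun i =>
      (PySem.List.pyRange 0 (w - 4) 1).any (fun j =>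
        p (PySem.Str.join "" ((PySem.List.pyRange 0 5 1).map (fun k => cell (i+k) (j+k))))
        || p (PySem.Str.join "" ((PySem.List.pyRange 0 5 1).map (fun k => cell (i+k) (j+4-k)))))))
    = ((PySem.List.pyRange 0 (h + w - 1) 1).any (fun d =>
        [(PySem.List.pyRange (max 0 (d-w+1)) (min h (d+1)) 1).map (fun i => cell i (i - d + w - 1)),
         (PySem.List.pyRange (max 0 (d-w+1)) (min h (d+1)) 1).map (fun i => cell i (d - i))].any (fun cells =>
          (PySem.List.pyRange 0 ((cells.length : Int) - 4) 1).any (fun t =>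
            p (PySem.Str.join "" (PySem.List.slice cells (some t) (some (t+5)))))))) := by
  apply bool_ext
  rw [List.any_eq_true]
  conv_rhs => rw [List.any_eq_true]
  constructor
  · rintro ⟨i, hi, hrest⟩
    rw [PySem.List.mem_pyRange_one] at hi
    rw [List.any_eq_true] at hrest
    obtain ⟨j, hj, hor⟩ := hrest
    rw [PySem.List.mem_pyRange_one] at hj
    rw [Bool.or_eq_true] at hor
    rcases hor with hp | hp
    · refine ⟨i - j + w - 1, by rw [PySem.List.mem_pyRange_one]; omega, ?_⟩
      simp only [List.any_cons, List.any_nil, Bool.or_false, Bool.or_eq_true]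
      left
      rw [inner_any p _ (max 0 (i - j + w - 1 - w + 1)) (min h (i - j + w - 1 + 1))]
      refine ⟨i - max 0 (i - j + w - 1 - w + 1), by omega, by omega, ?_⟩
      simp only [awindow_eq] at hp
      convert hp using 3
      simp only [List.cons.injEq, and_true]
      refine ⟨?_, ?_, ?_, ?_, ?_⟩ <;> (congr 1 <;> omega)
    · refine ⟨i + j + 4, by rw [PySem.List.mem_pyRange_one]; omega, ?_⟩
      simp only [List.any_cons, List.any_nil, Bool.or_false, Bool.or_eq_true]
      right
      rw [inner_any p _ (max 0 (i + j + 4 - w + 1)) (min h (i + j + 4 + 1))]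
      refine ⟨i - max 0 (i + j + 4 - w + 1), by omega, by omega, ?_⟩
      simp only [awindow_eq] at hp
      convert hp using 3
      simp only [List.cons.injEq, and_true]
      refine ⟨?_, ?_, ?_, ?_, ?_⟩ <;> (congr 1 <;> omega)
  · rintro ⟨d, hd, hor⟩
    rw [PySem.List.mem_pyRange_one] at hd
    simp only [List.any_cons, List.any_nil, Bool.or_false, Bool.or_eq_true] at hor
    rcases hor with hq | hq
    · rw [inner_any p _ (max 0 (d-w+1)) (min h (d+1))] at hq
      obtain ⟨t, h0, h5, hp⟩ := hq
      refine ⟨max 0 (d-w+1) + t, by rw [PySem.List.mem_pyRange_one]; omega, ?_⟩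
      rw [List.any_eq_true]
      refine ⟨max 0 (d-w+1) + t - d + w - 1, by rw [PySem.List.mem_pyRange_one]; omega, ?_⟩
      rw [Bool.or_eq_true]
      left
      simp only [awindow_eq]
      convert hp using 3
      simp only [List.cons.injEq, and_true]
      refine ⟨?_, ?_, ?_, ?_, ?_⟩ <;> (congr 1 <;> omega)
    · rw [inner_any p _ (max 0 (d-w+1)) (min h (d+1))] at hq
      obtain ⟨t, h0, h5, hp⟩ := hq
      refine ⟨max 0 (d-w+1) + t, by rw [PySem.List.mem_pyRange_one]; omega, ?_⟩
      rw [List.any_eq_true]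
      refine ⟨d - (max 0 (d-w+1) + t) - 4, by rw [PySem.List.mem_pyRange_one]; omega, ?_⟩
      rw [Bool.or_eq_true]
      right
      simp only [awindow_eq]
      convert hp using 3
      simp only [List.cons.injEq, and_true]
      refine ⟨?_, ?_, ?_, ?_, ?_⟩ <;> (congr 1 <;> omega)

theorem gwc_if_merge (a b c : Bool) (X Y : Bool × Option String) :
    (if a then X else if b then X else if c then X else Y)
      = (if (a || b) then X else if c then X else Y) := by
  cases a <;> cases b <;> simp

theorem gwc_eq (board : List (List String)) (player : String)
    (hpre : Pre_get_winning_condition board player) :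
    get_winning_condition board player = get_winning_condition_alt board player := by
  obtain ⟨hne, hrc⟩ := hpre
  rcases hrc with hrect | hwin
  case inr =>
    have hA1 : board.any (fun row =>
        decide (PySem.Str.count (PySem.Str.join "" row) player > 4)) = true := by
      rw [List.any_eq_true]
      obtain ⟨r, hr, hc⟩ := hwin
      exact ⟨r, hr, by simpa using hc⟩
    unfold get_winning_condition get_winning_condition_alt
    dsimp only
    rw [if_pos hA1, if_pos (by simp only [List.any_append, List.any_map,
      Function.comp_def, hA1, Bool.true_or])]
  unfold get_winning_condition get_winning_condition_alt
  dsimp only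
  set wN := (board.headD []).length with hwN
  have hcols : board.foldl (fun cs row =>
        (PySem.List.enumerate row 0).foldl (fun cs jc =>
          if jc.1 < ((wN : Nat) : Int) then cs.set jc.1.toNat ((cs.getD jc.1.toNat []) ++ [jc.2]) else cs) cs)
      (List.replicate ((wN : Nat) : Int).toNat ([] : List String))
      = (List.range wN).map (fun c => board.map (fun r => r.getD c "")) := by
    have hrep : List.replicate ((wN : Nat) : Int).toNat ([] : List String)
        = (List.range wN).map (fun _ => ([] : List String)) := by
      simp [List.map_const']
    rw [hrep, sweep_cols wN board hrect (fun _ => [])]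
    simp
  rw [hcols]
  have ha2 : (((List.range wN).map (fun c => board.map (fun r => r.getD c ""))).map
        (fun c => PySem.Str.join "" c)).any (fun s => decide (PySem.Str.count s player > 4))
      = (PySem.List.pyRange 0 ((wN : Nat) : Int) 1).any (fun col =>
          decide (PySem.Str.count (PySem.Str.join ""
            (board.map (fun row => PySem.List.pyGetD row col ""))) player > 4)) := by
    rw [PySem.List.pyRange_one]
    simp [List.any_map, Function.comp_def]
  have hd := diag_phase (fun s => decide (PySem.Str.count s player > 4)) (pvCell board)
      ((board.length : Int)) ((wN : Nat) : Int)
  simp only [] at hd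
  rw [List.any_append, List.any_map, ha2, ← hd]
  simp only [Function.comp_def]
  exact gwc_if_merge _ _ _ _ _

-- ===== VERDICT (by name: the statement is the Claim_ definition above) =====
theorem get_winning_condition_spec : Claim_equal_get_winning_condition := by
  intro board player _ hpre
  unfold Spec_get_winning_condition
  exact gwc_eq board player hpre
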